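-- pv_equiv track=rewrite | github.com/McElyea/Orket | scripts/companion/companion_matrix_case_selection.py | parse_provider_model_map
-- ===== SOURCE A (Python) =====
-- def _normalize_token(raw: str) -> str:
--     return str(raw or "").strip()
--
-- def parse_provider_model_map(raw: str) -> list[dict[str, str]]:
--     text = str(raw or "").strip()
--     if not text:
--         return []
--
--     pairs: list[dict[str, str]] = []
--     segments = [segment.strip() for segment in text.split(";") if segment.strip()]
--     for segment in segments:
--         if "=" not in segment:
--             raise ValueError(f"missing '=' in segment '{segment}'")
--         provider_raw, models_raw = segment.split("=", 1)
--         provider = _normalize_token(provider_raw)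
--         if not provider:
--             raise ValueError(f"empty provider in segment '{segment}'")
--         model_tokens = [_normalize_token(token) for token in models_raw.split("|") if _normalize_token(token)]
--         if not model_tokens:
--             pairs.append({"provider": provider, "model": ""})
--             continue
--         for model in model_tokens:
--             pairs.append({"provider": provider, "model": model})
--     return _dedupe_pairs(pairs)
--
-- def _dedupe_pairs(pairs: list[dict[str, str]]) -> list[dict[str, str]]:
--     ordered: list[dict[str, str]] = []
--     seen: set[tuple[str, str]] = set()
--     for row in pairs:
--         provider = _normalize_token(str(row.get("provider") or ""))
--         model = _normalize_token(str(row.get("model") or ""))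
--         key = (provider, model)
--         if not provider or key in seen:
--             continue
--         seen.add(key)
--         ordered.append({"provider": provider, "model": model})
--     return ordered
-- ===== SOURCE B (Python) =====
-- def parse_provider_model_map(raw: str) -> list[dict[str, str]]:
--     text = str(raw or "").strip()
--     ordered: list[dict[str, str]] = []
--     seen: set[tuple[str, str]] = set()
--     for piece in text.split(";"):
--         segment = piece.strip()
--         if not segment:
--             continue
--         if "=" not in segment:
--             raise ValueError(f"missing '=' in segment '{segment}'")
--         provider_raw, models_raw = segment.split("=", 1)
--         provider = provider_raw.strip()
--         if not provider:
--             raise ValueError(f"empty provider in segment '{segment}'")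
--         models = [m for m in (t.strip() for t in models_raw.split("|")) if m] or [""]
--         for model in models:
--             key = (provider, model)
--             if key not in seen:
--                 seen.add(key)
--                 ordered.append({"provider": provider, "model": model})
--     return ordered
-- ===== Notes on version B (the rewrite author's own statement) =====
-- stated objective: simpler
-- what changed: B replaces A's two-pass build-all-pairs-then-dedupe (with its redundant re-normalization and empty-provider re-check) by a single pass over the ';'-segments that dedupes with a seen-set while emitting rows.
import Mathlib
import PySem

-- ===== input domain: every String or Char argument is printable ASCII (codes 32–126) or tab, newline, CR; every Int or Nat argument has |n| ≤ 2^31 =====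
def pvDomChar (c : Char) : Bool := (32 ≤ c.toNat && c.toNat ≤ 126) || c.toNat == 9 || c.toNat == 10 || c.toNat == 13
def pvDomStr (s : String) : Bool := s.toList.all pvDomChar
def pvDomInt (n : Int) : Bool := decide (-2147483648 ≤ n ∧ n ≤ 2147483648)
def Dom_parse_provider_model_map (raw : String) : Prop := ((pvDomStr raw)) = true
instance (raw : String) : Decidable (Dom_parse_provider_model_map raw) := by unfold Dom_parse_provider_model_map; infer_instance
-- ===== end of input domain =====

-- B replaces A's build-all-pairs-then-dedupe two-pass structure with a single pass that
-- dedupes while emitting rows (objective: simpler single traversal, same results).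

-- ===== PORT A =====
def pv_normalize_token (raw : String) : String := PySem.Str.strip raw

-- rows appended for one segment; none = the Python raise (missing '=' / empty provider)
def pvA_segment_rows (segment : String) : Option (List (List (String × String))) :=
  if PySem.Str.isIn "=" segment = false then none
  else
    let parts := (PySem.Str.splitMax? segment "=" 1).getD []
    let provider := pv_normalize_token (parts.headD "")
    if provider = "" then none
    else
      let model_tokens :=
        (((PySem.Str.split? (parts.getD 1 "") "|").getD []).filter
          (fun t => pv_normalize_token t ≠ "")).map pv_normalize_token
      if model_tokens = [] then some [[("provider", provider), ("model", "")]]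
      else some (model_tokens.map (fun m => [("provider", provider), ("model", m)]))

def pvA_dedupe_step
    (st : PySem.Set (String × String) × List (List (String × String)))
    (row : List (String × String)) :
    PySem.Set (String × String) × List (List (String × String)) :=
  let provider := pv_normalize_token ((row.lookup "provider").getD "")
  let model := pv_normalize_token ((row.lookup "model").getD "")
  let key := (provider, model)
  if provider = "" ∨ PySem.Set.contains st.1 key then st
  else (PySem.Set.add st.1 key, st.2 ++ [[("provider", provider), ("model", model)]])

def pv_dedupe_pairs (pairs : List (List (String × String))) : List (List (String × String)) :=
  (pairs.foldl pvA_dedupe_step (([] : PySem.Set (String × String)), [])).2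

def parse_provider_model_map (raw : String) : List (List (String × String)) :=
  let text := PySem.Str.strip raw
  if text = "" then []
  else
    let segments := (((PySem.Str.split? text ";").getD []).filter
        (fun s => PySem.Str.strip s ≠ "")).map (fun s => PySem.Str.strip s)
    match segments.foldl
        (fun acc seg => acc.bind (fun ps => (pvA_segment_rows seg).map (ps ++ ·)))
        (some []) with
    | none => []          -- Python raises ValueError here; excluded by Pre_
    | some pairs => pv_dedupe_pairs pairs

-- ===== PORT B =====
-- one iteration of B's single pass; none = the Python raise
def pvB_step
    (st : PySem.Set (String × String) × List (List (String × String)))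
    (piece : String) :
    Option (PySem.Set (String × String) × List (List (String × String))) :=
  let segment := PySem.Str.strip piece
  if segment = "" then some st
  else if PySem.Str.isIn "=" segment = false then none
  else
    let parts := (PySem.Str.splitMax? segment "=" 1).getD []
    let provider := PySem.Str.strip (parts.headD "")
    if provider = "" then none
    else
      let stripped := ((PySem.Str.split? (parts.getD 1 "") "|").getD []).map PySem.Str.strip
      let models := if stripped.filter (· ≠ "") = [] then [""] else stripped.filter (· ≠ "")
      some (models.foldl (fun st2 model =>
          if PySem.Set.contains st2.1 (provider, model) then st2
          else (PySem.Set.add st2.1 (provider, model),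
                st2.2 ++ [[("provider", provider), ("model", model)]])) st)

def parse_provider_model_map_alt (raw : String) : List (List (String × String)) :=
  let pieces := (PySem.Str.split? (PySem.Str.strip raw) ";").getD []
  ((pieces.foldl (fun acc piece => acc.bind (fun st => pvB_step st piece))
      (some (([] : PySem.Set (String × String)), []))).map (·.2)).getD []

-- ===== PRECONDITION & SPEC =====
-- Pre_ excludes exactly the inputs on which A raises ValueError: some ';'-segment, nonempty
-- after strip, has no '=' or an empty provider part; B raises the same errors there.
def Pre_parse_provider_model_map (raw : String) : Prop :=
  ∀ piece ∈ (PySem.Str.split? (PySem.Str.strip raw) ";").getD [],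
    PySem.Str.strip piece ≠ "" →
      PySem.Str.isIn "=" (PySem.Str.strip piece) = true ∧
      PySem.Str.strip
        (((PySem.Str.splitMax? (PySem.Str.strip piece) "=" 1).getD []).headD "") ≠ ""

instance (raw : String) : Decidable (Pre_parse_provider_model_map raw) := by
  unfold Pre_parse_provider_model_map; infer_instance

def pvWitness_parse_provider_model_map : String := "openai=gpt-4|gpt-4 | ; anthropic = claude"

def Spec_parse_provider_model_map (raw : String) (out : List (List (String × String))) : Prop := out = parse_provider_model_map_alt raw
instance (raw : String) (out : List (List (String × String))) : Decidable (Spec_parse_provider_model_map raw out) := by unfold Spec_parse_provider_model_map; infer_instance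

-- ===== CLAIM (what is proved, stated in full; the proofs are below) =====
def Claim_equal_parse_provider_model_map : Prop := ∀ (raw : String), Dom_parse_provider_model_map raw → Pre_parse_provider_model_map raw → Spec_parse_provider_model_map raw (parse_provider_model_map raw)

-- ===== LEMMAS AND PROOFS =====

-- the common dedupe step, acting on bare (provider, model) keys
def pvStep
    (st : PySem.Set (String × String) × List (List (String × String)))
    (pm : String × String) :
    PySem.Set (String × String) × List (List (String × String)) :=
  if PySem.Set.contains st.1 pm then st
  else (PySem.Set.add st.1 pm, st.2 ++ [[("provider", pm.1), ("model", pm.2)]])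

def pvRow (pm : String × String) : List (String × String) :=
  [("provider", pm.1), ("model", pm.2)]

-- the (provider, model) keys a valid segment contributes
def pvKeys (segment : String) : List (String × String) :=
  let parts := (PySem.Str.splitMax? segment "=" 1).getD []
  let provider := pv_normalize_token (parts.headD "")
  let f := (((PySem.Str.split? (parts.getD 1 "") "|").getD []).filter
      (fun t => pv_normalize_token t ≠ "")).map pv_normalize_token
  (if f = [] then [""] else f).map (fun m => (provider, m))

def pvWf (pm : String × String) : Prop :=
  PySem.Str.strip pm.1 = pm.1 ∧ pm.1 ≠ "" ∧ PySem.Str.strip pm.2 = pm.2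

theorem pv_dropWhile_idem {α : Type} (p : α → Bool) (l : List α) :
    (l.dropWhile p).dropWhile p = l.dropWhile p := by
  induction l with
  | nil => rfl
  | cons c l ih =>
    rw [List.dropWhile_cons]
    split
    · exact ih
    · next h => rw [List.dropWhile_cons, if_neg h]

theorem pv_dropWhile_prefix_eq_self {α : Type} (p : α → Bool) (u t : List α)
    (hpre : u <+: t) (ht : t.dropWhile p = t) : u.dropWhile p = u := by
  cases u with
  | nil => rfl
  | cons c u' =>
    obtain ⟨r, hr⟩ := hpre
    subst hr
    rw [List.cons_append, List.dropWhile_cons] at ht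
    split at ht
    · have hle := List.length_dropWhile_le p (u' ++ r)
      have hlen : (List.dropWhile p (u' ++ r)).length = (u' ++ r).length + 1 := by
        rw [ht]; rfl
      omega
    · next h =>
      rw [List.dropWhile_cons, if_neg (by simp_all)]

theorem pv_chars_strip_idem (cs : List Char) :
    PySem.Chars.strip (PySem.Chars.strip cs) = PySem.Chars.strip cs := by
  unfold PySem.Chars.strip PySem.Chars.rstrip PySem.Chars.lstrip
  set p := PySem.Chars.isspace
  set a := cs.dropWhile p with ha
  have hda : a.dropWhile p = a := by rw [ha]; exact pv_dropWhile_idem ..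
  set b := (a.reverse.dropWhile p).reverse with hb
  have hpre : b <+: a := by
    have hs : a.reverse.dropWhile p <:+ a.reverse := List.dropWhile_suffix _
    have := (List.reverse_prefix (l₁ := a.reverse.dropWhile p) (l₂ := a.reverse)).mpr hs
    simpa [hb] using this
  have hlb : b.dropWhile p = b := pv_dropWhile_prefix_eq_self p b a hpre hda
  rw [hlb, hb]
  rw [List.reverse_reverse, pv_dropWhile_idem]

theorem pv_strip_idem (s : String) :
    PySem.Str.strip (PySem.Str.strip s) = PySem.Str.strip s := by
  simp [PySem.Str.strip, pv_chars_strip_idem]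

-- A's dedupe step on a row of a well-formed key is the bare key step
theorem pvA_step_eq (st : PySem.Set (String × String) × List (List (String × String)))
    (pm : String × String) (h : pvWf pm) :
    pvA_dedupe_step st (pvRow pm) = pvStep st pm := by
  obtain ⟨h1, h2, h3⟩ := h
  simp [pvA_dedupe_step, pvRow, pvStep, pv_normalize_token, List.lookup, h1, h3, h2]

-- every key a valid segment contributes is well-formed
theorem pvKeys_wf (segment : String)
    (hprov : PySem.Str.strip
        (((PySem.Str.splitMax? segment "=" 1).getD []).headD "") ≠ "") :
    ∀ pm ∈ pvKeys segment, pvWf pm := by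
  intro pm hm
  unfold pvKeys at hm
  simp only [List.mem_map] at hm
  obtain ⟨m, hm', rfl⟩ := hm
  refine ⟨pv_strip_idem _, by simpa [pv_normalize_token, pv_strip_idem] using hprov, ?_⟩
  split at hm'
  · simp at hm'
    subst hm'
    rfl
  · rcases List.mem_map.mp hm' with ⟨t, -, rfl⟩
    exact pv_strip_idem t

-- A's per-segment rows are exactly the rows of its keys
theorem pvA_segment_rows_eq (segment : String)
    (hIn : PySem.Str.isIn "=" segment = true)
    (hprov : PySem.Str.strip
        (((PySem.Str.splitMax? segment "=" 1).getD []).headD "") ≠ "") :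
    pvA_segment_rows segment = some ((pvKeys segment).map pvRow) := by
  simp only [pvA_segment_rows, pvKeys]
  rw [if_neg (show ¬ _ = false by rw [hIn]; simp),
    if_neg (show pv_normalize_token (((PySem.Str.splitMax? segment "=" 1).getD []).headD "") ≠ ""
      from hprov)]
  split
  · rfl
  · simp [pvRow]

-- B's step on a valid piece folds exactly the keys of its stripped segment
theorem pvB_step_eq (st : PySem.Set (String × String) × List (List (String × String)))
    (piece : String)
    (hne : PySem.Str.strip piece ≠ "")
    (hIn : PySem.Str.isIn "=" (PySem.Str.strip piece) = true)
    (hprov : PySem.Str.strip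
        (((PySem.Str.splitMax? (PySem.Str.strip piece) "=" 1).getD []).headD "") ≠ "") :
    pvB_step st piece = some ((pvKeys (PySem.Str.strip piece)).foldl pvStep st) := by
  simp only [pvB_step, pvKeys]
  rw [if_neg hne, if_neg (show ¬ _ = false by rw [hIn]; simp), if_neg hprov,
    List.foldl_map, List.filter_map]
  rfl

theorem pvB_step_skip (st : PySem.Set (String × String) × List (List (String × String)))
    (piece : String) (hempty : PySem.Str.strip piece = "") :
    pvB_step st piece = some st := by
  unfold pvB_step
  rw [if_pos hempty]

-- B's main fold, on valid pieces, is a fold of pvStep over the concatenated key lists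
theorem pvB_fold_eq (pieces : List String)
    (st : PySem.Set (String × String) × List (List (String × String)))
    (h : ∀ piece ∈ pieces, PySem.Str.strip piece ≠ "" →
      PySem.Str.isIn "=" (PySem.Str.strip piece) = true ∧
      PySem.Str.strip
        (((PySem.Str.splitMax? (PySem.Str.strip piece) "=" 1).getD []).headD "") ≠ "") :
    pieces.foldl (fun acc piece => acc.bind (fun st => pvB_step st piece)) (some st)
      = some ((pieces.flatMap (fun p =>
          if PySem.Str.strip p = "" then [] else pvKeys (PySem.Str.strip p))).foldl pvStep st) := by
  induction pieces generalizing st with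
  | nil => rfl
  | cons p ps ih =>
    rw [List.foldl_cons, List.flatMap_cons]
    by_cases hp : PySem.Str.strip p = ""
    · rw [Option.bind_some, pvB_step_skip st p hp, if_pos hp, List.nil_append]
      exact ih st (fun q hq => h q (List.mem_cons_of_mem _ hq))
    · obtain ⟨hIn, hprov⟩ := h p (List.mem_cons_self ..) hp
      rw [Option.bind_some, pvB_step_eq st p hp hIn hprov, if_neg hp, List.foldl_append]
      exact ih _ (fun q hq => h q (List.mem_cons_of_mem _ hq))

-- A's main fold, on valid segments, collects all rows
theorem pvA_fold_eq (segs : List String) (ps : List (List (String × String)))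
    (h : ∀ seg ∈ segs, PySem.Str.isIn "=" seg = true ∧
      PySem.Str.strip (((PySem.Str.splitMax? seg "=" 1).getD []).headD "") ≠ "") :
    segs.foldl (fun acc seg => acc.bind (fun l => (pvA_segment_rows seg).map (l ++ ·)))
        (some ps)
      = some (ps ++ segs.flatMap (fun seg => (pvKeys seg).map pvRow)) := by
  induction segs generalizing ps with
  | nil => simp
  | cons s ss ih =>
    obtain ⟨hIn, hprov⟩ := h s (List.mem_cons_self ..)
    rw [List.foldl_cons, Option.bind_some, pvA_segment_rows_eq s hIn hprov,
      Option.map_some, List.flatMap_cons, ← List.append_assoc]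
    exact ih _ (fun q hq => h q (List.mem_cons_of_mem _ hq))

-- dedupe over rows of well-formed keys is the bare-key fold
theorem pv_dedupe_rows_eq (keys : List (String × String))
    (st : PySem.Set (String × String) × List (List (String × String)))
    (h : ∀ pm ∈ keys, pvWf pm) :
    (keys.map pvRow).foldl pvA_dedupe_step st = keys.foldl pvStep st := by
  rw [List.foldl_map]
  exact PySem.List.foldl_congr_mem keys _ _ st (fun acc x hx => pvA_step_eq acc x (h x hx))

-- the key lists traversed by A and B coincide
theorem pv_keys_lists_eq (pieces : List String) :
    ((pieces.filter (fun s => decide (PySem.Str.strip s ≠ ""))).map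
        (fun s => PySem.Str.strip s)).flatMap pvKeys
      = pieces.flatMap (fun p =>
          if PySem.Str.strip p = "" then [] else pvKeys (PySem.Str.strip p)) := by
  induction pieces with
  | nil => rfl
  | cons p ps ih =>
    by_cases hp : PySem.Str.strip p = ""
    · rw [List.flatMap_cons, if_pos hp, List.nil_append, ← ih,
        List.filter_cons_of_neg (by simp [hp])]
    · rw [List.flatMap_cons, if_neg hp, ← ih,
        List.filter_cons_of_pos (by simp [hp]), List.map_cons, List.flatMap_cons]

-- ===== VERDICT (by name: the statement is the Claim_ definition above) =====
theorem parse_provider_model_map_spec : Claim_equal_parse_provider_model_map := by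
  intro raw _ hpre
  unfold Spec_parse_provider_model_map
  by_cases htext : PySem.Str.strip raw = ""
  · show parse_provider_model_map raw = parse_provider_model_map_alt raw
    simp only [parse_provider_model_map, parse_provider_model_map_alt, htext]
    decide
  · unfold Pre_parse_provider_model_map at hpre
    show parse_provider_model_map raw = parse_provider_model_map_alt raw
    simp only [parse_provider_model_map, parse_provider_model_map_alt]
    rw [if_neg htext]
    set pieces := (PySem.Str.split? (PySem.Str.strip raw) ";").getD [] with hpieces
    have hsegs : ∀ seg ∈ (pieces.filter (fun s => decide (PySem.Str.strip s ≠ ""))).map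
        (fun s => PySem.Str.strip s),
        PySem.Str.isIn "=" seg = true ∧
        PySem.Str.strip (((PySem.Str.splitMax? seg "=" 1).getD []).headD "") ≠ "" := by
      intro seg hseg
      rcases List.mem_map.mp hseg with ⟨piece, hpf, rfl⟩
      rcases List.mem_filter.mp hpf with ⟨hmem, hne⟩
      exact hpre piece hmem (by simpa using hne)
    rw [pvA_fold_eq _ [] hsegs, pvB_fold_eq _ _ (fun piece hmem => hpre piece hmem)]
    simp only [List.nil_append, Option.map_some, Option.getD_some]
    unfold pv_dedupe_pairs
    rw [← List.map_flatMap, pv_dedupe_rows_eq, ← pv_keys_lists_eq]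
    intro pm hm
    rcases List.mem_flatMap.mp hm with ⟨p, hpmem, hpk⟩
    rcases List.mem_map.mp hpmem with ⟨piece, hpf, rfl⟩
    rcases List.mem_filter.mp hpf with ⟨hmem, hne⟩
    exact pvKeys_wf _ ((hpre piece hmem (by simpa using hne)).2) pm hpk
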